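-- pv_equiv track=rewrite | github.com/miczek2309/logia | najwieksza_suma.py | najwieksza_suma
-- ===== SOURCE A (Python) =====
-- def najwieksza_suma(lista):
--     n = 0
--     reka = 0
--     for i in lista[1:]:
--         for x in lista:
--             if x != i:
--                 n = x + i
--             if reka < n:
--                 reka = n
--     return reka
-- ===== SOURCE B (Python) =====
-- def najwieksza_suma(lista):
--     if not lista:
--         return 0
--     m1 = max(lista)
--     reszta = [x for x in lista if x != m1]
--     m2 = max(reszta) if reszta else None
--     best = 0
--     for i in lista[1:]:
--         p = m1 if i != m1 else m2
--         if p is not None and best < i + p: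
--             best = i + p
--     return best
-- ===== Notes on version B (the rewrite author's own statement) =====
-- stated objective: faster
-- what changed: Replaces A's nested scan over all (tail element, list element) pairs by an O(n) pass: B precomputes max(lista) and the max of values different from it, then pairs each tail element with the best allowed partner.
import Mathlib
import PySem

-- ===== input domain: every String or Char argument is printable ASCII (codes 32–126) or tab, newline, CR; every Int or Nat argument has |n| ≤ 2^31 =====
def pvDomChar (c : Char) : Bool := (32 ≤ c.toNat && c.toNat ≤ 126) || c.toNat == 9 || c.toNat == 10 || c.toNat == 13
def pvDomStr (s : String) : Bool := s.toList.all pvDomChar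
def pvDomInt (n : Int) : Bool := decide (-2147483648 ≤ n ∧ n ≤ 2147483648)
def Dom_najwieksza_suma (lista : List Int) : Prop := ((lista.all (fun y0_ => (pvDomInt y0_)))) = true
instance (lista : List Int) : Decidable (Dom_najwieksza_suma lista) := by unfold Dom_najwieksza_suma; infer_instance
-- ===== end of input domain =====

-- B replaces A's O(n^2) nested scan by an O(n) pass: precompute max(lista) and the max of
-- values different from it, then combine with each element of lista[1:]; same return value.

-- ===== PORT A =====
-- inner 'for x in lista' loop of A, state (n, reka)
def pvInnerA (lista : List Int) (i : Int) (st : Int × Int) : Int × Int :=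
  lista.foldl (fun st x =>
    let n := if x ≠ i then x + i else st.1
    (n, if st.2 < n then n else st.2)) st

def najwieksza_suma (lista : List Int) : Int :=
  ((PySem.List.slice lista (some 1) none).foldl
    (fun st i => pvInnerA lista i st) (0, 0)).2

-- ===== PORT B =====
-- loop body of B: partner of i is m1 unless i == m1, then m2 (max of values ≠ m1)
def pvStepB (m1 : Int) (m2 : Option Int) (best i : Int) : Int :=
  match (if i ≠ m1 then some m1 else m2) with
  | some p => if best < i + p then i + p else best
  | none => best

def najwieksza_suma_alt (lista : List Int) : Int :=
  match PySem.List.max? lista (fun y => y) with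
  | none => 0
  | some m1 =>
    let reszta := lista.filter (fun x => x ≠ m1)
    let m2 := PySem.List.max? reszta (fun y => y)
    (PySem.List.slice lista (some 1) none).foldl (fun best i => pvStepB m1 m2 best i) 0

-- ===== PRECONDITION & SPEC =====
def Spec_najwieksza_suma (lista : List Int) (out : Int) : Prop := out = najwieksza_suma_alt lista
instance (lista : List Int) (out : Int) : Decidable (Spec_najwieksza_suma lista out) := by unfold Spec_najwieksza_suma; infer_instance

-- ===== CLAIM (what is proved, stated in full; the proofs are below) =====
def Claim_equal_najwieksza_suma : Prop := ∀ (lista : List Int), Dom_najwieksza_suma lista → Spec_najwieksza_suma lista (najwieksza_suma lista)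

-- ===== LEMMAS AND PROOFS =====

-- canonical form of A's inner loop: running max of x + i over x ≠ i
def pvG (i : Int) (l : List Int) (r : Int) : Int :=
  l.foldl (fun r x => if x ≠ i then max r (x + i) else r) r

theorem pv_if_max (r v : Int) : (if r < v then v else r) = max r v := by
  by_cases h : r < v <;> simp [h] <;> omega

-- A's inner loop keeps n ≤ reka and its reka is pvG
theorem pvInnerA_spec (l : List Int) (i : Int) :
    ∀ n r : Int, n ≤ r →
      (pvInnerA l i (n, r)).1 ≤ (pvInnerA l i (n, r)).2 ∧
      (pvInnerA l i (n, r)).2 = pvG i l r := by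
  induction l with
  | nil => intro n r h; simpa [pvInnerA, pvG] using h
  | cons x t ih =>
    intro n r h
    by_cases hx : x = i
    · have hr : (if r < n then n else r) = r := by
        rw [pv_if_max]; omega
      simpa [pvInnerA, pvG, hx, hr] using ih n r h
    · have h' : x + i ≤ max r (x + i) := le_max_right _ _
      simpa [pvInnerA, pvG, hx, pv_if_max] using ih (x + i) (max r (x + i)) h'

-- A's outer loop in canonical form
theorem pvOuterA_spec (lista : List Int) :
    ∀ (tl : List Int) (n r : Int), n ≤ r →
      (tl.foldl (fun st i => pvInnerA lista i st) (n, r)).2 =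
      tl.foldl (fun r i => pvG i lista r) r := by
  intro tl
  induction tl with
  | nil => intro n r _; rfl
  | cons i t ih =>
    intro n r h
    obtain ⟨h1, h2⟩ := pvInnerA_spec lista i n r h
    simp only [List.foldl_cons]
    rw [show pvInnerA lista i (n, r) =
        ((pvInnerA lista i (n, r)).1, (pvInnerA lista i (n, r)).2) from rfl]
    rw [ih _ _ h1, h2]

-- running max of x + i over a list whose max is M
theorem pv_fold_maxadd_le (l : List Int) (i : Int) :
    ∀ r c : Int, r ≤ c → (∀ x ∈ l, x + i ≤ c) →
      l.foldl (fun r x => max r (x + i)) r ≤ c := by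
  induction l with
  | nil => intro r c h _; simpa using h
  | cons x t ih =>
    intro r c h hx
    simp only [List.foldl_cons]
    exact ih _ _ (max_le h (hx x (by simp))) (fun y hy => hx y (by simp [hy]))

theorem pv_fold_maxadd_eq (l : List Int) (i r M : Int)
    (hM : M ∈ l) (hle : ∀ x ∈ l, x ≤ M) :
    l.foldl (fun r x => max r (x + i)) r = max r (M + i) := by
  have h1 := PySem.List.le_foldl_max_int l (fun x => x + i) r
  apply le_antisymm
  · exact pv_fold_maxadd_le l i r (max r (M + i)) (le_max_left _ _)
      (fun x hx => le_trans (by have := hle x hx; omega) (le_max_right _ _))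
  · exact max_le h1.1 (h1.2 M hM)

-- guarded fold = plain fold over the filtered list
theorem pvG_filter (i : Int) (l : List Int) :
    ∀ r : Int, pvG i l r =
      (l.filter (fun x => x ≠ i)).foldl (fun r x => max r (x + i)) r := by
  induction l with
  | nil => intro r; rfl
  | cons x t ih =>
    intro r
    by_cases hx : x = i
    · simpa [pvG, List.filter_cons, hx] using ih r
    · simpa [pvG, List.filter_cons, hx] using ih (max r (x + i))

-- per-element agreement: A's canonical inner loop equals B's step
theorem pvG_eq_stepB (lista : List Int) (m1 : Int)
    (h1 : PySem.List.max? lista (fun y => y) = some m1) (i r : Int) :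
    pvG i lista r =
      pvStepB m1 (PySem.List.max? (lista.filter (fun x => x ≠ m1)) (fun y => y)) r i := by
  have hm1mem : m1 ∈ lista := PySem.List.max?_mem h1
  have hm1max : ∀ y ∈ lista, y ≤ m1 := PySem.List.max?_isMax h1
  by_cases hi : i = m1
  · subst hi
    rw [pvG_filter]
    cases hr : lista.filter (fun x => x ≠ i) with
    | nil =>
      simp [pvStepB,
        show PySem.List.max? ([] : List Int) (fun y => y) = none from
          (PySem.List.max?_eq_none_iff _ _).mpr rfl]
    | cons h t =>
      have hM : PySem.List.max? (h :: t) (fun y => y) = some (t.foldl max h) :=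
        PySem.List.max?_id_cons h t
      have hMmem : t.foldl max h ∈ h :: t := PySem.List.max?_mem hM
      have hMmax : ∀ y ∈ h :: t, y ≤ t.foldl max h := PySem.List.max?_isMax hM
      rw [pv_fold_maxadd_eq _ i r _ hMmem hMmax, hM]
      simp [pvStepB, pv_if_max, Int.add_comm]
  · have hm1f : m1 ∈ lista.filter (fun x => x ≠ i) := by
      simp only [List.mem_filter]
      exact ⟨hm1mem, by simp [Ne.symm hi]⟩
    have hmaxf : ∀ x ∈ lista.filter (fun x => x ≠ i), x ≤ m1 := by
      intro x hx; exact hm1max x (List.mem_of_mem_filter hx)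
    rw [pvG_filter, pv_fold_maxadd_eq _ i r m1 hm1f hmaxf]
    simp [pvStepB, hi, pv_if_max, Int.add_comm]

-- ===== VERDICT (by name: the statement is the Claim_ definition above) =====
theorem najwieksza_suma_spec : Claim_equal_najwieksza_suma := by
  intro lista _
  unfold Spec_najwieksza_suma najwieksza_suma najwieksza_suma_alt
  cases h1 : PySem.List.max? lista (fun y => y) with
  | none =>
    have : lista = [] := (PySem.List.max?_eq_none_iff _ _).mp h1
    subst this; rfl
  | some m1 =>
    rw [pvOuterA_spec lista _ 0 0 le_rfl]
    have hfun : (fun (r i : Int) => pvG i lista r) =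
        (fun r i => pvStepB m1
          (PySem.List.max? (lista.filter (fun x => x ≠ m1)) (fun y => y)) r i) := by
      funext r i; exact pvG_eq_stepB lista m1 h1 i r
    rw [hfun]
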